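-- pv_equiv track=rewrite | github.com/Cvillas91/myPython | codeWars/6kyu.py | remember
-- ===== SOURCE A (Python) =====
-- def remember(s):
--     l = len(s)
--     iter = 0
--     fin = []
--     while iter <= l:
--         newS = s[:iter]
--         for el in set(newS):
--             if newS.count(el) > 1:
--                 if el not in fin:
--                     fin.append(el)
--         iter += 1
--     return fin
-- ===== SOURCE B (Python) =====
-- def remember(s):
--     counts = {}
--     fin = []
--     for c in s:
--         n = counts.get(c, 0) + 1
--         counts[c] = n
--         if n == 2:
--             fin.append(c)
--     return fin
-- ===== Notes on version B (the rewrite author's own statement) =====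
-- stated objective: faster
-- what changed: Replaced A's loop over all prefixes with an inner set-scan and count by a single left-to-right pass keeping a count dictionary and appending a character exactly when its count reaches 2.
import Mathlib
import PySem

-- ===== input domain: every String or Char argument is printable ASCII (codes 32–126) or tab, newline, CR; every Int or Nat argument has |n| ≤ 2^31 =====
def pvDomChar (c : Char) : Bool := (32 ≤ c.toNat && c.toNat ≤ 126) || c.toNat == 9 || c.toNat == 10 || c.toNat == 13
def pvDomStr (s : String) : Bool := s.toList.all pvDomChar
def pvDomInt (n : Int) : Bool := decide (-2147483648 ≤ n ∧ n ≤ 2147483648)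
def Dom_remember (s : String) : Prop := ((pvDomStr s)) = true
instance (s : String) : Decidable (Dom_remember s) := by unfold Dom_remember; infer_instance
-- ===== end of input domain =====

-- B replaces A's prefix-by-prefix rescanning with a single counting pass that appends a
-- character exactly when its count reaches 2 (same output; measured faster).

-- ===== PORT A =====
-- the body of A's inner 'for el in set(newS)' loop
def rememberInner (newS : List Char) (fin : List String) (el : Char) : List String :=
  if 1 < PySem.List.count newS el then
    if String.ofList [el] ∉ fin then fin ++ [String.ofList [el]] else fin
  else fin

-- A: while iter <= len(s): scan set(s[:iter]), append chars with count > 1 not yet in fin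
def remember (s : String) : List String :=
  let l := PySem.Str.len s
  (PySem.List.pyRange 0 (l + 1) 1).foldl
    (fun fin iter =>
      let newS := PySem.List.slice s.toList none (some iter)
      (PySem.Set.ofList newS).foldl (rememberInner newS) fin)
    []

-- ===== PORT B =====
-- B's loop body: bump c's count; append c when the new count n is exactly 2
def rememberAltStep (st : PySem.Dict Char Int × List String) (c : Char) :
    PySem.Dict Char Int × List String :=
  let n := st.1.getD c 0 + 1
  (st.1.insert c n, if n == 2 then st.2 ++ [String.ofList [c]] else st.2)

def remember_alt (s : String) : List String :=
  (s.toList.foldl rememberAltStep (PySem.Dict.empty, [])).2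

-- ===== PRECONDITION & SPEC =====
def Spec_remember (s : String) (out : List String) : Prop := out = remember_alt s
instance (s : String) (out : List String) : Decidable (Spec_remember s out) := by unfold Spec_remember; infer_instance

-- ===== CLAIM (what is proved, stated in full; the proofs are below) =====
def Claim_equal_remember : Prop := ∀ (s : String), Dom_remember s → Spec_remember s (remember s)

-- ===== LEMMAS AND PROOFS =====

-- A's outer loop body, over the character list (proof-side name for the port's lambda)
def outerStep (cs : List Char) (fin : List String) (iter : Int) : List String :=
  (PySem.Set.ofList (PySem.List.slice cs none (some iter))).foldl
    (rememberInner (PySem.List.slice cs none (some iter))) fin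

-- A's computation expressed over the character list
def rememberList (cs : List Char) : List String :=
  (PySem.List.pyRange 0 ((cs.length : Int) + 1) 1).foldl (outerStep cs) []

theorem remember_eq_list (s : String) : remember s = rememberList s.toList := by
  unfold remember rememberList outerStep
  rw [PySem.Str.len_eq]

theorem rememberAltStep_eq (st : PySem.Dict Char Int × List String) (c : Char) :
    rememberAltStep st c
      = (st.1.insert c (st.1.getD c 0 + 1),
         if st.1.getD c 0 + 1 == 2 then st.2 ++ [String.ofList [c]] else st.2) := rfl

theorem ofList_singleton_inj {a b : Char} : String.ofList [a] = String.ofList [b] ↔ a = b := by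
  constructor
  · intro h; have := congrArg String.toList h; simpa using this
  · rintro rfl; rfl

-- once fin already contains every char of count ≥ 2 in ys, the inner scan adds nothing
theorem inner_fixed (ys : List Char) (fin : List String)
    (h : ∀ ch : Char, String.ofList [ch] ∈ fin ↔ 2 ≤ ys.count ch) :
    ∀ L : List Char, L.foldl (rememberInner ys) fin = fin := by
  intro L
  induction L with
  | nil => rfl
  | cons el L ih =>
    have hstep : rememberInner ys fin el = fin := by
      unfold rememberInner
      rw [PySem.List.count_eq]
      by_cases hc : 1 < List.count el ys
      · rw [if_pos hc, if_neg]
        simp only [not_not]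
        exact (h el).mpr (by omega)
      · rw [if_neg hc]
    rw [List.foldl_cons, hstep]; exact ih

-- the inner scan over the extended prefix xs ++ [c] appends exactly c, iff c's count in xs is 1
theorem inner_main (xs : List Char) (c : Char) (fin : List String)
    (h : ∀ ch : Char, String.ofList [ch] ∈ fin ↔ 2 ≤ xs.count ch) :
    ∀ L : List Char, L.foldl (rememberInner (xs ++ [c])) fin
      = fin ++ (if c ∈ L ∧ xs.count c = 1 then [String.ofList [c]] else []) := by
  intro L
  induction L with
  | nil => simp
  | cons el L ih =>
    by_cases hel : el = c
    · subst hel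
      have hcnt : (xs ++ [el]).count el = xs.count el + 1 := by
        simp [List.count_append]
      rcases Nat.lt_or_ge (xs.count el) 1 with h0 | h1
      · -- count 0 in xs: count 1 in the prefix, nothing to add for el
        have hz : xs.count el = 0 := by omega
        have hstep : rememberInner (xs ++ [el]) fin el = fin := by
          unfold rememberInner
          rw [PySem.List.count_eq, if_neg (by omega)]
        rw [List.foldl_cons, hstep, ih]
        have : ¬ (el ∈ L ∧ xs.count el = 1) := by rintro ⟨-, h1⟩; omega
        have h1' : ¬ xs.count el = 1 := by omega
        simp [h1']
      · rcases Nat.lt_or_ge (xs.count el) 2 with h2 | h2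
        · -- count exactly 1: append, then the scan is saturated
          have h1' : xs.count el = 1 := by omega
          have hnotmem : String.ofList [el] ∉ fin := by
            intro hm; have := (h el).mp hm; omega
          have hstep : rememberInner (xs ++ [el]) fin el = fin ++ [String.ofList [el]] := by
            unfold rememberInner
            rw [PySem.List.count_eq, if_pos (by omega), if_pos hnotmem]
          rw [List.foldl_cons, hstep,
            inner_fixed (xs ++ [el]) (fin ++ [String.ofList [el]]) ?_ L]
          · simp [h1']
          · intro ch
            rw [List.mem_append, h ch, List.count_append]
            by_cases hch : ch = el
            · subst hch; simp [h1']
            · have hne : ¬ el = ch := fun hh => hch hh.symm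
              simp [hne, ofList_singleton_inj, hch]
        · -- count ≥ 2: el already in fin
          have hmem : String.ofList [el] ∈ fin := (h el).mpr h2
          have hstep : rememberInner (xs ++ [el]) fin el = fin := by
            unfold rememberInner
            rw [PySem.List.count_eq, if_pos (by omega), if_neg (by simp [hmem])]
          rw [List.foldl_cons, hstep, ih]
          have : ¬ xs.count el = 1 := by omega
          simp [this]
    · -- el ≠ c: its count is unchanged by the appended c, so nothing happens
      have hcnt : (xs ++ [c]).count el = xs.count el := by
        have : ¬ c = el := fun hh => hel hh.symm
        simp [List.count_append, this]
      have hstep : rememberInner (xs ++ [c]) fin el = fin := by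
        unfold rememberInner
        rw [PySem.List.count_eq]
        by_cases hc2 : 1 < List.count el (xs ++ [c])
        · rw [if_pos hc2, if_neg]
          simp only [not_not]
          exact (h el).mpr (by rw [← hcnt]; omega)
        · rw [if_neg hc2]
      rw [List.foldl_cons, hstep, ih]
      have : ¬ c = el := fun hh => hel hh.symm
      simp [this]

-- joint invariant: A's list = B's list, A's list holds exactly the count-≥-2 chars,
-- and B's dict holds the counts
theorem main_invariant (cs : List Char) :
    rememberList cs = (cs.foldl rememberAltStep (PySem.Dict.empty, [])).2
    ∧ (∀ ch : Char, String.ofList [ch] ∈ rememberList cs ↔ 2 ≤ cs.count ch)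
    ∧ (∀ ch : Char, (cs.foldl rememberAltStep (PySem.Dict.empty, [])).1.getD ch 0
        = (cs.count ch : Int)) := by
  induction cs using List.reverseRecOn with
  | nil =>
    have h0 : rememberList [] = [] := rfl
    refine ⟨by rw [h0]; rfl, ?_, ?_⟩
    · intro ch; rw [h0]; simp
    · intro ch; simp [PySem.Dict.getD_empty]
  | append_singleton cs c ih =>
    obtain ⟨heq, hmem, hdict⟩ := ih
    have hrange : PySem.List.pyRange 0 (((cs ++ [c]).length : Int) + 1) 1
        = PySem.List.pyRange 0 ((cs.length : Int) + 1) 1 ++ [(cs.length : Int) + 1] := by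
      have : ((cs ++ [c]).length : Int) + 1 = ((cs.length : Int) + 1) + 1 := by
        simp only [List.length_append, List.length_cons, List.length_nil]; push_cast; omega
      rw [this, PySem.List.pyRange_one_succ_right (by positivity)]
    have hprefix : ∀ (fin : List String), ∀ iter ∈ PySem.List.pyRange 0 ((cs.length : Int) + 1) 1,
        outerStep (cs ++ [c]) fin iter = outerStep cs fin iter := by
      intro fin iter hit
      rw [PySem.List.mem_pyRange_one] at hit
      unfold outerStep
      rw [PySem.List.slice_to _ hit.1, List.take_append_of_le_length (by omega),
        ← PySem.List.slice_to _ hit.1]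
    have hlast : PySem.List.slice (cs ++ [c]) none (some ((cs.length : Int) + 1))
        = cs ++ [c] := by
      rw [PySem.List.slice_to _ (by positivity)]
      exact List.take_of_length_le (by simp)
    have hA : rememberList (cs ++ [c])
        = rememberList cs ++ (if cs.count c = 1 then [String.ofList [c]] else []) := by
      unfold rememberList
      rw [hrange, List.foldl_append,
        PySem.List.foldl_congr_mem _ (outerStep (cs ++ [c])) (outerStep cs) [] hprefix]
      rw [show (PySem.List.pyRange 0 ((cs.length : Int) + 1) 1).foldl (outerStep cs) []
            = rememberList cs from rfl]
      show outerStep (cs ++ [c]) (rememberList cs) ((cs.length : Int) + 1) = _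
      unfold outerStep
      rw [hlast, inner_main cs c (rememberList cs) hmem]
      have hcmem : c ∈ PySem.Set.ofList (cs ++ [c]) := by
        rw [PySem.Set.mem_ofList]; simp
      simp [hcmem]
    have hB : (cs ++ [c]).foldl rememberAltStep (PySem.Dict.empty, [])
        = rememberAltStep (cs.foldl rememberAltStep (PySem.Dict.empty, [])) c := by
      rw [List.foldl_append]; rfl
    refine ⟨?_, ?_, ?_⟩
    · rw [hA, hB, rememberAltStep_eq, heq, hdict c]
      by_cases h1 : cs.count c = 1
      · simp [h1]
      · have : ¬ (((cs.count c : Int) + 1) == 2) = true := by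
          simp only [beq_iff_eq]; omega
        simp only [this, Bool.false_eq_true, if_false, h1, if_false, List.append_nil]
    · intro ch
      rw [hA, List.mem_append, hmem ch, List.count_append]
      by_cases hch : ch = c
      · subst hch
        have hc2 : List.count ch [ch] = 1 := by simp
        rw [hc2]
        by_cases h1 : cs.count ch = 1
        · simp [h1]
        · rw [if_neg h1]
          simp only [List.not_mem_nil, or_false]
          omega
      · have hne : ¬ c = ch := fun hh => hch hh.symm
        have hnomem : (String.ofList [ch] ∈ if cs.count c = 1
            then [String.ofList [c]] else []) ↔ False := by
          split <;> simp [ofList_singleton_inj, hch]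
        rw [hnomem]
        simp [hne]
    · intro ch
      rw [hB, rememberAltStep_eq]
      simp only
      rw [PySem.Dict.getD_insert]
      by_cases hch : ch = c
      · subst hch
        rw [if_pos rfl, hdict ch]
        simp [List.count_append]
      · rw [if_neg hch, hdict ch]
        have hne : ¬ c = ch := fun hh => hch hh.symm
        simp [List.count_append, hne]

-- ===== VERDICT (by name: the statement is the Claim_ definition above) =====
theorem remember_spec : Claim_equal_remember := by
  intro s _
  unfold Spec_remember
  rw [remember_eq_list]
  exact (main_invariant s.toList).1
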